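-- pv_equiv track=rewrite | github.com/BinderaQ/skibidi_airlines | ssssss-main/допоможіть я в підвалі/names.py | create_mountains
-- ===== SOURCE A (Python) =====
-- def create_mountains(width, height):
--     mountain_range = []
--     for row in range(height):
--         mountain_row = ""
--         for col in range(width):
--             if row < height // 2:
--                 if col == 0 or col == width - 1:
--                     mountain_row += "/"
--                 else:
--                     mountain_row += " "
--             else:
--                 if col == row - height // 2 or col == width - (row - height // 2) - 1:
--                     mountain_row += "\ "
--                 else:
--                     mountain_row += " "
--         mountain_range.append(mountain_row)
--     return mountain_range
-- ===== SOURCE B (Python) =====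
-- def create_mountains(width, height):
--     mid = height // 2
--     out = []
--     for row in range(height):
--         tokens = [" "] * max(width, 0)
--         if row < mid:
--             if width > 0:
--                 tokens[0] = "/"
--                 tokens[width - 1] = "/"
--         else:
--             p = row - mid
--             for idx in (p, width - p - 1):
--                 if 0 <= idx < width:
--                     tokens[idx] = "\\ "
--         out.append("".join(tokens))
--     return out
-- ===== Notes on version B (the rewrite author's own statement) =====
-- stated objective: faster
-- what changed: B builds each row by direct index assignment into a preallocated token list (setting only the two slope/edge positions) and joins once, instead of A's inner per-column loop testing every column and growing the string by repeated concatenation.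
import Mathlib
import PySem

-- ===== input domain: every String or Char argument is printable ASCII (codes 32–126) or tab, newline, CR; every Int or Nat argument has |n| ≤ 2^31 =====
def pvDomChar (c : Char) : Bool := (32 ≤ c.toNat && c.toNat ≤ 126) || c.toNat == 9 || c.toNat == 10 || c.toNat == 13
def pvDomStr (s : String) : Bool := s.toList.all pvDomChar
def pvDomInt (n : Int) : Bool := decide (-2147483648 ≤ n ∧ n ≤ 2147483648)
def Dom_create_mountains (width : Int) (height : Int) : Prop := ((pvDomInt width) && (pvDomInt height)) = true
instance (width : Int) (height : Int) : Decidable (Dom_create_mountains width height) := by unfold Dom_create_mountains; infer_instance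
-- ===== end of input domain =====

-- B builds each row by direct index assignment into a preallocated token list and joins once,
-- instead of A's per-column loop growing the string by repeated concatenation (objective: faster).

-- ===== PORT A =====
def create_mountains (width : Int) (height : Int) : List String :=
  (PySem.List.pyRange 0 height 1).foldl (fun mountain_range row =>
    let mountain_row :=
      (PySem.List.pyRange 0 width 1).foldl (fun s col =>
        if row < PySem.Int.floordiv height 2 then
          if col = 0 ∨ col = width - 1 then s ++ "/" else s ++ " "
        else
          if col = row - PySem.Int.floordiv height 2 ∨
             col = width - (row - PySem.Int.floordiv height 2) - 1 then s ++ "\\ " else s ++ " ") ""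
    mountain_range ++ [mountain_row]) []

-- ===== PORT B =====
def create_mountains_alt (width : Int) (height : Int) : List String :=
  let mid := PySem.Int.floordiv height 2
  (PySem.List.pyRange 0 height 1).foldl (fun out row =>
    let tokens := List.replicate (max width 0).toNat " "
    let tokens :=
      if row < mid then
        if width > 0 then
          PySem.List.pySetD (PySem.List.pySetD tokens 0 "/") (width - 1) "/"
        else tokens
      else
        let p := row - mid
        ([p, width - p - 1] : List Int).foldl (fun t idx =>
          if 0 ≤ idx ∧ idx < width then PySem.List.pySetD t idx "\\ " else t) tokens
    out ++ [PySem.Str.join "" tokens]) []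

-- ===== PRECONDITION & SPEC =====
def Spec_create_mountains (width : Int) (height : Int) (out : List String) : Prop := out = create_mountains_alt width height
instance (width : Int) (height : Int) (out : List String) : Decidable (Spec_create_mountains width height out) := by unfold Spec_create_mountains; infer_instance

-- ===== CLAIM (what is proved, stated in full; the proofs are below) =====
def Claim_equal_create_mountains : Prop := ∀ (width : Int) (height : Int), Dom_create_mountains width height → Spec_create_mountains width height (create_mountains width height)

-- ===== LEMMAS AND PROOFS =====

theorem join_empty_cons (x : String) (xs : List String) :
    PySem.Str.join "" (x :: xs) = x ++ PySem.Str.join "" xs := by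
  apply String.toList_inj.mp
  simp [PySem.Str.toList_join]
  cases xs with
  | nil => simp [PySem.Chars.join_nil, PySem.Chars.join_singleton]
  | cons y ys => simp [PySem.Chars.join_cons_cons]

theorem foldl_str_append (l : List Int) (f : Int → String) (s : String) :
    l.foldl (fun acc c => acc ++ f c) s = s ++ PySem.Str.join "" (l.map f) := by
  induction l generalizing s with
  | nil =>
    apply String.toList_inj.mp
    simp [PySem.Str.toList_join, PySem.Chars.join_nil]
  | cons c cs ih =>
    simp only [List.foldl_cons, List.map_cons, join_empty_cons, ih, String.append_assoc]

def pvPiece (width mid row col : Int) : String :=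
  if row < mid then
    if col = 0 ∨ col = width - 1 then "/" else " "
  else
    if col = row - mid ∨ col = width - (row - mid) - 1 then "\\ " else " "

theorem setGuard_spec (width : Int) (v : String) (idxs : List Int) (t : List String) :
    (idxs.foldl (fun t idx => if 0 ≤ idx ∧ idx < width then PySem.List.pySetD t idx v else t) t).length = t.length ∧
    (t.length = width.toNat → ∀ (k : ℕ), k < width.toNat →
      (idxs.foldl (fun t idx => if 0 ≤ idx ∧ idx < width then PySem.List.pySetD t idx v else t) t).getD k " " =
        if (k : Int) ∈ idxs then v else t.getD k " ") := by
  induction idxs generalizing t with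
  | nil => exact ⟨rfl, fun _ k _ => by simp⟩
  | cons idx rest ih =>
    have hstep : (if 0 ≤ idx ∧ idx < width then PySem.List.pySetD t idx v else t).length = t.length := by
      split_ifs with h
      · rw [PySem.List.pySetD_of_nonneg _ _ h.1]; simp
      · rfl
    obtain ⟨hl, hg⟩ := ih (if 0 ≤ idx ∧ idx < width then PySem.List.pySetD t idx v else t)
    refine ⟨by rw [List.foldl_cons, hl, hstep], fun ht k hk => ?_⟩
    rw [List.foldl_cons, hg (by rw [hstep, ht]) k hk]
    by_cases hmem : (k : Int) ∈ rest
    · simp [hmem]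
    · simp only [hmem, if_false, List.mem_cons, or_false]
      by_cases hki : (k : Int) = idx
      · have hguard : 0 ≤ idx ∧ idx < width := ⟨by omega, by omega⟩
        rw [if_pos hki, if_pos hguard,
            PySem.List.pySetD_of_nonneg _ _ hguard.1,
            List.getD_eq_getElem _ _ (by simp; omega), List.getElem_set, if_pos (by omega)]
      · rw [if_neg hki]
        split_ifs with hguard
        · rw [PySem.List.pySetD_of_nonneg _ _ hguard.1,
              List.getD_eq_getElem _ _ (by simp; omega),
              List.getElem_set, if_neg (by omega), List.getD_eq_getElem _ _ (by omega)]
        · rfl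

theorem tokens_eq (width mid row : Int) :
    (if row < mid then
        if width > 0 then
          PySem.List.pySetD (PySem.List.pySetD (List.replicate (max width 0).toNat " ") 0 "/") (width - 1) "/"
        else List.replicate (max width 0).toNat " "
      else
        ([row - mid, width - (row - mid) - 1] : List Int).foldl (fun t idx =>
          if 0 ≤ idx ∧ idx < width then PySem.List.pySetD t idx "\\ " else t)
          (List.replicate (max width 0).toNat " "))
    = (PySem.List.pyRange 0 width 1).map (pvPiece width mid row) := by
  have hmax : (max width 0).toNat = width.toNat := by omega
  by_cases hr : row < mid
  · rw [if_pos hr]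
    by_cases hw : width > 0
    · rw [if_pos hw, PySem.List.pySetD_of_nonneg _ _ le_rfl,
          PySem.List.pySetD_of_nonneg _ _ (by omega : (0:Int) ≤ width - 1)]
      apply List.ext_getElem
      · simp [PySem.List.length_pyRange_one, hmax]
      · intro k hk1 hk2
        have hkw : k < width.toNat := by
          simpa [PySem.List.length_pyRange_one] using hk2
        simp only [List.getElem_map, PySem.List.getElem_pyRange_one, zero_add,
          List.getElem_set, List.getElem_replicate]
        unfold pvPiece
        rw [if_pos hr]
        split_ifs <;> first | rfl | omega
    · rw [if_neg hw]
      have h1 : (max width 0).toNat = 0 := by omega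
      have h2 : PySem.List.pyRange 0 width 1 = [] :=
        PySem.List.pyRange_one_eq_nil (by omega)
      simp [h1, h2]
  · rw [if_neg hr]
    obtain ⟨hl, hg⟩ := setGuard_spec width "\\ " [row - mid, width - (row - mid) - 1]
      (List.replicate (max width 0).toNat " ")
    apply List.ext_getElem
    · rw [hl]; simp [PySem.List.length_pyRange_one, hmax]
    · intro k hk1 hk2
      have hkw : k < width.toNat := by
        simpa [PySem.List.length_pyRange_one] using hk2
      have := hg (by simp [hmax]) k hkw
      rw [List.getD_eq_getElem _ _ (by rw [hl]; simp [hmax]; omega),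
          List.getD_eq_getElem _ _ (by simp [hmax]; omega)] at this
      rw [this]
      simp only [List.getElem_map, PySem.List.getElem_pyRange_one, zero_add,
        List.getElem_replicate]
      unfold pvPiece
      rw [if_neg hr]

      simp [List.mem_cons]

theorem rowA_eq (width mid row : Int) :
    (PySem.List.pyRange 0 width 1).foldl (fun s col =>
      if row < mid then
        if col = 0 ∨ col = width - 1 then s ++ "/" else s ++ " "
      else
        if col = row - mid ∨ col = width - (row - mid) - 1 then s ++ "\\ " else s ++ " ") ""
    = PySem.Str.join "" ((PySem.List.pyRange 0 width 1).map (pvPiece width mid row)) := by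
  have hfun : (fun (s : String) (col : Int) =>
      if row < mid then
        if col = 0 ∨ col = width - 1 then s ++ "/" else s ++ " "
      else
        if col = row - mid ∨ col = width - (row - mid) - 1 then s ++ "\\ " else s ++ " ")
      = fun (s : String) (col : Int) => s ++ pvPiece width mid row col := by
    funext s col
    unfold pvPiece
    split_ifs <;> rfl
  rw [hfun, foldl_str_append]
  apply String.toList_inj.mp
  simp

theorem create_mountains_eq (width height : Int) :
    create_mountains width height = create_mountains_alt width height := by
  unfold create_mountains create_mountains_alt
  simp only [PySem.List.foldl_append_singleton_eq_map, List.nil_append]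
  refine List.map_congr_left fun row _ => ?_
  rw [rowA_eq width (PySem.Int.floordiv height 2) row,
      tokens_eq width (PySem.Int.floordiv height 2) row]

-- ===== VERDICT (by name: the statement is the Claim_ definition above) =====
theorem create_mountains_spec : Claim_equal_create_mountains := by
  intro width height _
  unfold Spec_create_mountains
  exact create_mountains_eq width height
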